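-- pv_equiv track=rewrite | github.com/pabloalvarez99/JAVA | STUDY/SOLUCIONES/PYTHON/03_Control_Flujo/ejercicios_extra_solucion.py | menu_loop
-- ===== SOURCE A (Python) =====
-- def menu_loop(actions):
--     """Procesa acciones hasta encontrar "salir"."""
--     out = []
--     i = 0
--     while i < len(actions):
--         accion = actions[i]
--         if accion == "salir":
--             break
--         out.append(accion)
--         i += 1
--     return out
-- ===== SOURCE B (Python) =====
-- def menu_loop(actions):
--     """Procesa acciones hasta encontrar "salir"."""
--     try:
--         idx = actions.index("salir")
--     except ValueError:
--         return list(actions)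
--     return actions[:idx]
-- ===== Notes on version B (the rewrite author's own statement) =====
-- stated objective: simpler
-- what changed: Replaces the index-driven append-until-break while loop with a locate-then-slice decomposition: find the first 'salir' with list.index and return the slice before it, or a full copy if absent.
import Mathlib
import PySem

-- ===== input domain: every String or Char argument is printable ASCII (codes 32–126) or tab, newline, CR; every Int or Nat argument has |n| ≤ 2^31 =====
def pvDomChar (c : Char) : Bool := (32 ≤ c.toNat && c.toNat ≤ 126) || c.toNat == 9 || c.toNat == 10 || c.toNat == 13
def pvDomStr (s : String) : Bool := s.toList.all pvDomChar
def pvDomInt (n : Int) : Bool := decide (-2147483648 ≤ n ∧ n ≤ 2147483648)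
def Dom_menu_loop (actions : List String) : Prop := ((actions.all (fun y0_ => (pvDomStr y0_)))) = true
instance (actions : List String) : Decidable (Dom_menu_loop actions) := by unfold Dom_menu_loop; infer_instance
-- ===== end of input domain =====

-- ===== PORT A =====
def menu_loop_go (actions : List String) (i : Nat) (out : List String) : List String :=
  if h : i < actions.length then
    let accion := actions[i]
    if accion = "salir" then out
    else menu_loop_go actions (i + 1) (out ++ [accion])
  else out
termination_by actions.length - i

def menu_loop (actions : List String) : List String :=
  menu_loop_go actions 0 []

-- ===== PORT B =====
-- try actions.index("salir") → slice, ValueError → copy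
def menu_loop_alt (actions : List String) : List String :=
  match PySem.List.index? actions "salir" with
  | some idx => PySem.List.slice actions none (some (idx : Int))
  | none => actions

-- ===== PRECONDITION & SPEC =====
def Spec_menu_loop (actions : List String) (out : List String) : Prop := out = menu_loop_alt actions
instance (actions : List String) (out : List String) : Decidable (Spec_menu_loop actions out) := by unfold Spec_menu_loop; infer_instance

-- ===== CLAIM (what is proved, stated in full; the proofs are below) =====
def Claim_equal_menu_loop : Prop := ∀ (actions : List String), Dom_menu_loop actions → Spec_menu_loop actions (menu_loop actions)

-- ===== LEMMAS AND PROOFS =====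

lemma go_eq (n : Nat) : ∀ (l : List String) (i : Nat) (out : List String), l.length - i = n →
    menu_loop_go l i out = out ++ (l.drop i).takeWhile (fun s => !(s == "salir")) := by
  induction n with
  | zero =>
    intro l i out h
    unfold menu_loop_go
    rw [dif_neg (by omega), List.drop_eq_nil_of_le (by omega)]
    simp
  | succ n ih =>
    intro l i out h
    have hi : i < l.length := by omega
    unfold menu_loop_go
    rw [dif_pos hi]
    have hdrop : l.drop i = l[i] :: l.drop (i + 1) := List.drop_eq_getElem_cons hi
    by_cases hs : l[i] = "salir"
    · simp only [hs, hdrop, List.takeWhile]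
      simp
    · rw [if_neg hs, ih l (i + 1) _ (by omega), hdrop]
      have hb : (l[i] == "salir") = false := beq_false_of_ne hs
      simp [List.takeWhile, hb]

lemma alt_eq (l : List String) : menu_loop_alt l = l.takeWhile (fun s => !(s == "salir")) := by
  induction l with
  | nil => rfl
  | cons a t ih =>
    unfold menu_loop_alt
    by_cases ha : a = "salir"
    · subst ha
      rw [PySem.List.index?_cons_self]
      show PySem.List.slice ("salir" :: t) none (some ((0 : Nat) : Int)) = _
      rw [PySem.List.slice_to_natCast]
      simp [List.takeWhile]
    · rw [show PySem.List.index? (a :: t) "salir" = Option.map (fun x => x + 1) (PySem.List.index? t "salir") from PySem.List.index?_cons_of_ne t ha]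
      have hb : (a == "salir") = false := beq_false_of_ne ha
      cases hidx : PySem.List.index? t "salir" with
      | none =>
        have ih' : t = List.takeWhile (fun s => !(s == "salir")) t := by
          rw [← ih]; unfold menu_loop_alt; rw [hidx]
        simp only [Option.map_none]
        simp [List.takeWhile, hb, ← ih']
      | some k =>
        have ih' : List.take k t = List.takeWhile (fun s => !(s == "salir")) t := by
          rw [← ih]; unfold menu_loop_alt
          rw [hidx]; exact (PySem.List.slice_to_natCast t k).symm
        simp only [Option.map_some]
        rw [PySem.List.slice_to_natCast]
        simp [List.takeWhile, hb, ← ih']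

-- ===== VERDICT (by name: the statement is the Claim_ definition above) =====
theorem menu_loop_spec : Claim_equal_menu_loop := by
  intro actions _
  unfold Spec_menu_loop menu_loop
  rw [go_eq (actions.length) actions 0 [] (by omega), alt_eq]
  simp
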